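-- pv_equiv track=rewrite | github.com/a2937/FreeCodeCamp-Challenges | Naomi Challenges/2025/March 5 (N-innochi)/main.py | customNFib
-- ===== SOURCE A (Python) =====
-- def customNFib(startingNums,length):
--     list = startingNums.copy()
--     nextNumber = 0
--     for x in range(len(startingNums),length):
--         for index in range(1,len(startingNums) + 1):
--             nextNumber += list[x - index]
--         list.append(nextNumber)
--         nextNumber = 0
--     return list
-- ===== SOURCE B (Python) =====
-- def customNFib(startingNums, length):
--     k = len(startingNums)
--     result = list(startingNums)
--     window = sum(startingNums)
--     for i in range(k, length):
--         result.append(window)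
--         window += window - result[i - k]
--     return result
-- ===== Notes on version B (the rewrite author's own statement) =====
-- stated objective: alternative
-- what changed: B replaces A's inner loop that re-sums the last k terms at every step by a running window sum updated incrementally per term (add the new term, subtract the term leaving the window).
import Mathlib
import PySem

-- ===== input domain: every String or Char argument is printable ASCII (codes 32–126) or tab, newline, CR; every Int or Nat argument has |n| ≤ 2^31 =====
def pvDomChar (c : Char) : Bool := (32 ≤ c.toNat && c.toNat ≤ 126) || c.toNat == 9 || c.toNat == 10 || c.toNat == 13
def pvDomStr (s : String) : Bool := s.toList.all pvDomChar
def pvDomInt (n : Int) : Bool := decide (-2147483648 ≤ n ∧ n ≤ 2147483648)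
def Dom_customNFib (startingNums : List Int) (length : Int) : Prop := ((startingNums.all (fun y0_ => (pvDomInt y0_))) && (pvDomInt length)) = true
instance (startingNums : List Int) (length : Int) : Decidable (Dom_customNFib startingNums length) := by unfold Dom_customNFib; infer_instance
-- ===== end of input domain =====

-- ===== PORT A =====
-- faithful transliteration of A: outer loop over range(len, length), inner loop re-sums the last k terms
def customNFib (startingNums : List Int) (length : Int) : List Int :=
  (PySem.List.pyRange (startingNums.length : Int) length 1).foldl
    (fun lst x =>
      let nextNumber :=
        (PySem.List.pyRange 1 ((startingNums.length : Int) + 1) 1).foldl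
          (fun acc index => acc + PySem.List.pyGetD lst (x - index) 0) 0
      lst ++ [nextNumber])
    (startingNums)

-- ===== PORT B =====
-- transliteration of B: running window sum updated incrementally per appended term
def customNFib_alt (startingNums : List Int) (length : Int) : List Int :=
  let k : Int := (startingNums.length : Int)
  ((PySem.List.pyRange k length 1).foldl
    (fun (st : List Int × Int) i =>
      let res := st.1 ++ [st.2]
      (res, st.2 + (st.2 - PySem.List.pyGetD res (i - k) 0)))
    (startingNums, startingNums.sum)).1

-- ===== PRECONDITION & SPEC =====
def Spec_customNFib (startingNums : List Int) (length : Int) (out : List Int) : Prop := out = customNFib_alt startingNums length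
instance (startingNums : List Int) (length : Int) (out : List Int) : Decidable (Spec_customNFib startingNums length out) := by unfold Spec_customNFib; infer_instance

-- ===== CLAIM (what is proved, stated in full; the proofs are below) =====
def Claim_equal_customNFib : Prop := ∀ (startingNums : List Int) (length : Int), Dom_customNFib startingNums length → Spec_customNFib startingNums length (customNFib startingNums length)

-- ===== LEMMAS AND PROOFS =====

-- inner loop of A: summing lst[x-1], lst[x-2], …, lst[x-j] (x = lst.length) is the sum of the last j elements
lemma pv_inner_sum (L : List Int) (j : Nat) (hj : j ≤ L.length) (acc : Int) :
    (PySem.List.pyRange 1 ((j : Int) + 1) 1).foldl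
      (fun acc index => acc + PySem.List.pyGetD L ((L.length : Int) - index) 0) acc
    = acc + (L.drop (L.length - j)).sum := by
  induction j generalizing acc with
  | zero =>
    rw [PySem.List.pyRange_one_eq_nil (by omega)]
    simp
  | succ j ih =>
    have h1 : (((j+1 : Nat)) : Int) + 1 = ((j : Int) + 1) + 1 := by push_cast; ring
    rw [h1, PySem.List.pyRange_one_succ_right (by omega), List.foldl_append,
        ih (by omega)]
    simp only [List.foldl_cons, List.foldl_nil]
    have hidx : (L.length : Int) - ((j : Int) + 1) = ((L.length - (j+1) : Nat) : Int) := by omega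
    rw [hidx, PySem.List.pyGetD_natCast]
    have hm : L.length - (j+1) < L.length := by omega
    have hdrop : L.drop (L.length - (j+1)) = L[L.length - (j+1)] :: L.drop (L.length - (j+1) + 1) := by
      exact List.drop_eq_getElem_cons hm
    have h2 : L.length - (j+1) + 1 = L.length - j := by omega
    rw [hdrop, h2] at *
    simp [List.getD_eq_getElem?_getD, List.getElem?_eq_getElem hm]
    ring

-- one window update of B lands on the sum of the last k elements of the extended list
lemma pv_window_step (L : List Int) (k : Nat) (hk : k ≤ L.length)
    (w : Int) (hw : w = (L.drop (L.length - k)).sum) :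
    w + (w - PySem.List.pyGetD (L ++ [w]) ((L.length : Int) - (k : Int)) 0)
    = ((L ++ [w]).drop (L.length + 1 - k)).sum := by
  rcases Nat.eq_zero_or_pos k with hk0 | hkpos
  · subst hk0
    have h0 : L.drop (L.length - 0) = [] := by simp
    rw [h0] at hw
    simp only [List.sum_nil] at hw
    subst hw
    have hidx : (L.length : Int) - (0 : Nat) = ((L.length : Nat) : Int) := by omega
    rw [hidx, PySem.List.pyGetD_natCast]
    have : (L ++ [(0:Int)]).drop (L.length + 1 - 0) = [] := by
      apply List.drop_eq_nil_of_le; simp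
    rw [this]
    simp [List.getD_eq_getElem?_getD]
  · have hm : L.length - k < L.length := by omega
    have hidx : (L.length : Int) - (k : Int) = ((L.length - k : Nat) : Int) := by omega
    rw [hidx, PySem.List.pyGetD_natCast]
    have hget : (L ++ [w]).getD (L.length - k) 0 = L[L.length - k] := by
      rw [List.getD_eq_getElem?_getD, List.getElem?_append_left hm,
          List.getElem?_eq_getElem hm]
      rfl
    rw [hget]
    have hdrop : L.drop (L.length - k) = L[L.length - k] :: L.drop (L.length - k + 1) := by
      exact List.drop_eq_getElem_cons hm
    rw [hdrop] at hw
    have hdrop2 : (L ++ [w]).drop (L.length + 1 - k) = L.drop (L.length - k + 1) ++ [w] := by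
      have h3 : L.length + 1 - k = L.length - k + 1 := by omega
      rw [h3, List.drop_append_of_le_length (by omega)]
    rw [hdrop2]
    simp only [List.sum_cons, List.sum_append, List.sum_cons, List.sum_nil] at *
    omega

-- main invariant: A's fold over [len, b) equals the first component of B's fold,
-- provided B's accumulator carries the sum of the last k elements
lemma pv_key (k : Nat) (n : Nat) : ∀ (L : List Int) (b : Int), k ≤ L.length →
    (b - (L.length : Int)).toNat = n →
    (PySem.List.pyRange (L.length : Int) b 1).foldl
      (fun lst x =>
        lst ++ [(PySem.List.pyRange 1 ((k : Int) + 1) 1).foldl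
          (fun acc index => acc + PySem.List.pyGetD lst (x - index) 0) 0]) L
    = ((PySem.List.pyRange (L.length : Int) b 1).foldl
        (fun (st : List Int × Int) i =>
          (st.1 ++ [st.2],
           st.2 + (st.2 - PySem.List.pyGetD (st.1 ++ [st.2]) (i - (k : Int)) 0)))
        (L, (L.drop (L.length - k)).sum)).1 := by
  induction n with
  | zero =>
    intro L b hk hb
    rw [PySem.List.pyRange_one_eq_nil (a := (L.length : Int)) (b := b) (by omega)]
    simp
  | succ n ih =>
    intro L b hk hb
    have hlt : (L.length : Int) < b := by omega
    rw [PySem.List.pyRange_one_cons (a := (L.length : Int)) (b := b) hlt]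
    simp only [List.foldl_cons]
    have hS : (PySem.List.pyRange 1 ((k : Int) + 1) 1).foldl
        (fun acc index => acc + PySem.List.pyGetD L ((L.length : Int) - index) 0) 0
        = (L.drop (L.length - k)).sum := by
      have := pv_inner_sum L k hk 0
      simpa using this
    set w : Int := (L.drop (L.length - k)).sum with hw
    have hlen : (L ++ [w]).length = L.length + 1 := by simp
    have hstep := pv_window_step L k hk w hw
    have happly := ih (L ++ [w]) b (by simp; omega) (by simp; omega)
    rw [hlen] at happly
    have hcast : ((L.length : Int) + 1) = ((L.length + 1 : Nat) : Int) := by push_cast; ring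
    rw [hS, hstep, hcast]
    exact happly

-- ===== VERDICT (by name: the statement is the Claim_ definition above) =====
theorem customNFib_spec : Claim_equal_customNFib := by
  unfold Claim_equal_customNFib Spec_customNFib customNFib customNFib_alt
  intro startingNums length _
  have h := pv_key startingNums.length ((length - (startingNums.length : Int)).toNat)
      startingNums length (le_refl _) rfl
  simpa using h
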